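-- pv_equiv track=rewrite | github.com/melsner/scil2019-fusion | script/genData.py | insertGlide
-- ===== SOURCE A (Python) =====
-- def insertGlide(phon):
--     highV = {"i" : "y", "u" : "w"}
--     vowels = "aeiou"
--     newPhon = []
--     high = None
--
--     for ci in "".join(phon):
--         if ci in highV:
--             if high: #sequence of two high vs in a row
--                 newPhon.append(highV[high])
--
--             high = ci
--         else:
--             if high:
--                 if ci in vowels:
--                     newPhon.append(highV[high])
--                 else:
--                     newPhon.append(high)
--                 high = None
--
--             newPhon.append(ci)
--
--     if high:
--         newPhon.append(high)
--
--     return newPhon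
-- ===== SOURCE B (Python) =====
-- def insertGlide(phon):
--     # Stateless pairwise pass: decide each character from its successor alone.
--     highV = {"i": "y", "u": "w"}
--     s = "".join(phon)
--     out = [highV[c] if c in highV and nxt in "aeiou" else c
--            for c, nxt in zip(s, s[1:])]
--     if s:
--         out.append(s[-1])
--     return out
-- ===== Notes on version B (the rewrite author's own statement) =====
-- stated objective: simpler
-- what changed: Replaced A's carried high-vowel state machine (pending `high` variable with an end-of-loop flush) by a stateless one-pass pairwise comprehension over zip(s, s[1:]) that decides each character from its successor alone, appending the last character unchanged.
import Mathlib
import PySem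

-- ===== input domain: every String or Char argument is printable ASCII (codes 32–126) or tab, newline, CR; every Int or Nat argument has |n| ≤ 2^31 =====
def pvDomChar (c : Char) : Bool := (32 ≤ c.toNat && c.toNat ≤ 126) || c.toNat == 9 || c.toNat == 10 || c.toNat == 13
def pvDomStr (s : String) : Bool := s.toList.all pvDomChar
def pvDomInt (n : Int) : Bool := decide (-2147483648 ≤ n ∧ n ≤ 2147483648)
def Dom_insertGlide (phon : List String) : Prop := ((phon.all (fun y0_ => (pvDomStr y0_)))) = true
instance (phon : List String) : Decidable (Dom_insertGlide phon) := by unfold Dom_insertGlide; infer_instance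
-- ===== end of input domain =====

-- B replaces A's carried `high` state machine by a stateless pairwise (one-character-lookahead) pass; objective: simpler.

-- ===== PORT A =====
-- `ci in highV` with highV = {"i":"y","u":"w"}; `highV[high]` inlined on its two keys.
def pvIsHigh (c : Char) : Bool := c = 'i' || c = 'u'
def pvGlideOf (c : Char) : Char := if c = 'i' then 'y' else 'w'
-- `ci in "aeiou"` for the single character ci
def pvIsVowel (c : Char) : Bool := c = 'a' || c = 'e' || c = 'i' || c = 'o' || c = 'u'

-- A's for-loop over "".join(phon) with accumulator newPhon and state high, plus the final flush.
def insertGlideLoop : List Char → Option Char → List String → List String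
  | [], high, newPhon =>
      match high with
      | some h => newPhon ++ [String.ofList [h]]
      | none => newPhon
  | ci :: rest, high, newPhon =>
      if pvIsHigh ci then
        match high with
        | some h => insertGlideLoop rest (some ci) (newPhon ++ [String.ofList [pvGlideOf h]])
        | none => insertGlideLoop rest (some ci) newPhon
      else
        match high with
        | some h =>
            insertGlideLoop rest none
              ((newPhon ++ [String.ofList [if pvIsVowel ci then pvGlideOf h else h]]) ++ [String.ofList [ci]])
        | none => insertGlideLoop rest none (newPhon ++ [String.ofList [ci]])

def insertGlide (phon : List String) : List String :=
  insertGlideLoop ((phon.map String.toList).flatten) none []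

-- ===== PORT B =====
def insertGlide_alt (phon : List String) : List String :=
  let s := (phon.map String.toList).flatten
  let out := (s.zip s.tail).map (fun p =>
    if pvIsHigh p.1 && pvIsVowel p.2 then String.ofList [pvGlideOf p.1] else String.ofList [p.1])
  match s.getLast? with             -- `if s: out.append(s[-1])`
  | some c => out ++ [String.ofList [c]]
  | none => out

-- ===== PRECONDITION & SPEC =====
def Spec_insertGlide (phon : List String) (out : List String) : Prop := out = insertGlide_alt phon
instance (phon : List String) (out : List String) : Decidable (Spec_insertGlide phon out) := by unfold Spec_insertGlide; infer_instance

-- ===== CLAIM (what is proved, stated in full; the proofs are below) =====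
def Claim_equal_insertGlide : Prop := ∀ (phon : List String), Dom_insertGlide phon → Spec_insertGlide phon (insertGlide phon)

-- ===== LEMMAS AND PROOFS =====

-- The common pairwise form both ports reduce to.
def pvPair : List Char → List String
  | [] => []
  | [c] => [String.ofList [c]]
  | c :: d :: cs =>
      (if pvIsHigh c && pvIsVowel d then String.ofList [pvGlideOf c] else String.ofList [c]) :: pvPair (d :: cs)

-- what A emits for a pending high vowel h given the remaining input
def pvOut (h : Char) : List Char → String
  | [] => String.ofList [h]
  | c :: _ => if pvIsVowel c then String.ofList [pvGlideOf h] else String.ofList [h]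

theorem insertGlideLoop_acc (cs : List Char) (high : Option Char) (acc : List String) :
    insertGlideLoop cs high acc = acc ++ insertGlideLoop cs high [] := by
  induction cs generalizing high acc with
  | nil => cases high <;> simp [insertGlideLoop]
  | cons c cs ih =>
      cases high with
      | none =>
          by_cases h : pvIsHigh c = true
          · simp only [insertGlideLoop, if_pos h]
            rw [ih, ih (some c) []]
          · simp only [insertGlideLoop, if_neg h, List.nil_append]
            rw [ih, ih none [String.ofList [c]]]
            simp
      | some hv =>
          by_cases h : pvIsHigh c = true
          · simp only [insertGlideLoop, if_pos h, List.nil_append]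
            rw [ih, ih (some c) [String.ofList [pvGlideOf hv]]]
            simp
          · simp only [insertGlideLoop, if_neg h, List.nil_append, List.append_assoc,
              List.singleton_append]
            rw [ih, ih none (String.ofList [if pvIsVowel c then pvGlideOf hv else hv] ::
              [String.ofList [c]])]
            simp

theorem loop_eq_pair (cs : List Char) :
    insertGlideLoop cs none [] = pvPair cs ∧
    ∀ h, insertGlideLoop cs (some h) [] = pvOut h cs :: pvPair cs := by
  induction cs with
  | nil => exact ⟨rfl, fun _ => rfl⟩
  | cons c cs ih =>
      obtain ⟨ihn, ihs⟩ := ih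
      have high_vowel : ∀ c, pvIsHigh c = true → pvIsVowel c = true := by
        intro c h
        simp only [pvIsHigh, Bool.or_eq_true, decide_eq_true_eq] at h
        rcases h with h | h <;> simp [pvIsVowel, h]
      constructor
      · by_cases hc : pvIsHigh c = true
        · rw [show insertGlideLoop (c :: cs) none [] = insertGlideLoop cs (some c) [] by
            simp [insertGlideLoop, hc]]
          rw [ihs c]
          cases cs with
          | nil => simp [pvPair, pvOut]
          | cons d ds => simp [pvPair, pvOut, hc]
        · rw [show insertGlideLoop (c :: cs) none [] =
              insertGlideLoop cs none [String.ofList [c]] by simp [insertGlideLoop, hc]]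
          rw [insertGlideLoop_acc, ihn]
          cases cs with
          | nil => simp [pvPair]
          | cons d ds => simp [pvPair, hc]
      · intro h
        by_cases hc : pvIsHigh c = true
        · rw [show insertGlideLoop (c :: cs) (some h) [] =
              insertGlideLoop cs (some c) [String.ofList [pvGlideOf h]] by
              simp [insertGlideLoop, hc]]
          rw [insertGlideLoop_acc, ihs c]
          cases cs with
          | nil => simp [pvPair, pvOut, high_vowel c hc]
          | cons d ds => simp [pvPair, pvOut, hc, high_vowel c hc]
        · rw [show insertGlideLoop (c :: cs) (some h) [] =
              insertGlideLoop cs none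
                [String.ofList [if pvIsVowel c then pvGlideOf h else h], String.ofList [c]] by
              simp [insertGlideLoop, hc]]
          rw [insertGlideLoop_acc, ihn]
          cases cs with
          | nil => cases hv : pvIsVowel c <;> simp [pvPair, pvOut, hv]
          | cons d ds => cases hv : pvIsVowel c <;> simp [pvPair, pvOut, hc, hv]

theorem alt_eq_pair (s : List Char) :
    ((s.zip s.tail).map (fun p =>
      if pvIsHigh p.1 && pvIsVowel p.2 then String.ofList [pvGlideOf p.1] else String.ofList [p.1]) ++
      (match s.getLast? with
       | some c => [String.ofList [c]]
       | none => ([] : List String))) = pvPair s := by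
  induction s with
  | nil => simp [pvPair]
  | cons c cs ih =>
      cases cs with
      | nil => simp [pvPair]
      | cons d ds =>
          simp only [List.tail_cons, List.zip_cons_cons, List.map_cons, List.cons_append,
            pvPair]
          rw [List.getLast?_cons_cons]
          exact congrArg _ ih

-- ===== VERDICT (by name: the statement is the Claim_ definition above) =====
theorem insertGlide_spec : Claim_equal_insertGlide := by
  intro phon _
  unfold Spec_insertGlide insertGlide insertGlide_alt
  rw [(loop_eq_pair _).1, ← alt_eq_pair]
  cases h : ((phon.map String.toList).flatten).getLast? <;> simp [h]
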